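-- pv_equiv track=rewrite | github.com/daniel-reich/ubiquitous-fiesta | wqBnr3CDYByA5GLxo_6.py | unravel
-- ===== SOURCE A (Python) =====
-- def unravel(txt):
--   if '[' not in txt: return [txt]
--   ret = []
--   start = txt.index('[')
--   end = txt.index(']')
--   switches = txt[start+1:end].split('|')
--
--   for switch in switches:
--     toadd = txt[:start] + switch + txt[end+1:]
--     if '[' in toadd:
--       for option in unravel(toadd):
--         ret.append(option)
--     else:
--       ret.append(toadd)
--   return sorted(ret)
-- ===== SOURCE B (Python) =====
-- def unravel(txt):
--   stack = [txt]
--   results = []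
--   while stack:
--     s = stack.pop()
--     if '[' not in s:
--       results.append(s)
--     else:
--       start = s.index('[')
--       end = s.index(']')
--       for switch in s[start+1:end].split('|'):
--         stack.append(s[:start] + switch + s[end+1:])
--   return sorted(results)
-- ===== Notes on version B (the rewrite author's own statement) =====
-- stated objective: alternative
-- what changed: Replaced the recursion that sorts the partial result at every level by an explicit worklist (stack) loop that only collects fully-expanded strings and sorts them once at the end.
import Mathlib
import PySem

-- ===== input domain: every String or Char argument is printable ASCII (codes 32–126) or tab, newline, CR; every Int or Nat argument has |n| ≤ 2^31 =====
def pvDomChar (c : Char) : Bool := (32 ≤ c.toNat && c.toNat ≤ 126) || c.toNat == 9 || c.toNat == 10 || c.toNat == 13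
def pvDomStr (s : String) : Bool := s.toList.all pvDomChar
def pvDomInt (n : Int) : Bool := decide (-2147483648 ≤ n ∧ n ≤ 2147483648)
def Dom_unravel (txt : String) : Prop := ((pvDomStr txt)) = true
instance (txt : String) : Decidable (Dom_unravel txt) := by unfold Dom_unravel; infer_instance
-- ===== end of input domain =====

-- B replaces A's recursion (which re-sorts the partial result at every level) by an explicit
-- worklist loop that collects the fully-expanded strings and sorts once at the end (objective:
-- alternative decomposition, same cost).

-- ===== PORT A =====
-- A's recursion is ported with fuel = (number of '[' in txt) + 1; under Pre_unravel every
-- recursive call strictly decreases the '['-count, so the fuel never runs out there (proved in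
-- the lemmas below); the fuel is only for totality of the Lean definition.
def unravelGoA : Nat → List Char → List (List Char)
  | 0, _ => []
  | fuel+1, t =>
    if PySem.Chars.isIn ['['] t = false then [t]
    else
      let start : Nat := (PySem.Chars.find t ['[']).toNat   -- txt.index('['): '[' ∈ t here, so find ≥ 0 and this is exact
      let stop : Nat := (PySem.Chars.find t [']']).toNat    -- txt.index(']'): Python raises ValueError when ']' is absent; Pre_unravel excludes that
      let switches := PySem.Chars.splitOn (PySem.List.slice t (some ((start : Int)+1)) (some (stop : Int))) ['|']
      let ret := switches.foldl (fun ret sw =>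
          let toadd := PySem.List.slice t none (some (start : Int)) ++ sw ++
                       PySem.List.slice t (some ((stop : Int)+1)) none
          if PySem.Chars.isIn ['['] toadd then ret ++ unravelGoA fuel toadd
          else ret ++ [toadd]) []
      PySem.List.sorted ret (fun cs => String.ofList cs) false   -- sorted(ret): Python's string order, realised on the char-list representation

def unravel (txt : String) : List String :=
  (unravelGoA (txt.toList.count '[' + 1) txt.toList).map (fun cs => String.ofList cs)

-- ===== PORT B =====
-- B's while-loop is ported as a recursion on the stack with fuel; under Pre_unravel the number
-- of loop iterations is below the fuel chosen in unravel_alt (proved below via a decreasing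
-- measure); the fuel is only for totality of the Lean definition.
def unravelGoB : Nat → List (List Char) → List (List Char) → List (List Char)
  | _, [], results => PySem.List.sorted results (fun cs => String.ofList cs) false   -- return sorted(results): Python's string order on the char-list representation
  | 0, _ :: _, _ => []
  | fuel+1, st :: stk, results =>
    let s := (st :: stk).getLast (by simp)                  -- s = stack.pop()
    let rest := (st :: stk).dropLast
    if PySem.Chars.isIn ['['] s = false then
      unravelGoB fuel rest (results ++ [s])
    else
      let start : Nat := (PySem.Chars.find s ['[']).toNat
      let stop : Nat := (PySem.Chars.find s [']']).toNat
      unravelGoB fuel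
        (rest ++ (PySem.Chars.splitOn (PySem.List.slice s (some ((start : Int)+1)) (some (stop : Int))) ['|']).map
          (fun sw => PySem.List.slice s none (some (start : Int)) ++ sw ++
                     PySem.List.slice s (some ((stop : Int)+1)) none))
        results

def unravel_alt (txt : String) : List String :=
  (unravelGoB ((txt.toList.length + 1) ^ (txt.toList.length + 1) + 1) [txt.toList] []).map
    (fun cs => String.ofList cs)

-- ===== PRECONDITION & SPEC =====
-- Pre_unravel holds exactly on the inputs where A returns: A's behaviour depends only on the
-- subsequence of '[' / ']' / '|' characters of each intermediate string, and A returns iff every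
-- expansion branch only ever reaches shapes whose first bracket is '[' with a ']' after it —
-- otherwise A raises ValueError ('[' present, ']' absent) or recurses forever (']' before '[').
-- pvTermShape is that grammar check on the '[',']','|'-shape; its depth argument (number of '['
-- plus one) is a bound proved sufficient below (pvTermShape_true_iff): it is not a simulation of
-- A (it never builds A's strings), only a well-formedness check of the bracket/pipe shape.
def pvShape (t : List Char) : List Char := t.filter (fun c => c == '[' || c == ']' || c == '|')

def pvTermShape : Nat → List Char → Bool
  | 0, _ => false
  | depth+1, w =>
    if '[' ∉ w then true
    else if ']' ∉ w then false
    else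
      let pre := w.takeWhile (fun x => !decide (x = ']'))
      let post := (w.dropWhile (fun x => !decide (x = ']'))).tail
      if '[' ∉ pre then false
      else
        let P := pre.takeWhile (fun x => !decide (x = '['))
        let M := (pre.dropWhile (fun x => !decide (x = '['))).tail
        (PySem.Chars.splitOn M ['|']).all (fun piece => pvTermShape depth (P ++ piece ++ post))

def Pre_unravel (txt : String) : Prop :=
  pvTermShape (txt.toList.count '[' + 1) (pvShape txt.toList) = true
instance (txt : String) : Decidable (Pre_unravel txt) := by unfold Pre_unravel; infer_instance

def pvWitness_unravel : String := "[a|[b]c]"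

def Spec_unravel (txt : String) (out : List String) : Prop := out = unravel_alt txt
instance (txt : String) (out : List String) : Decidable (Spec_unravel txt out) := by unfold Spec_unravel; infer_instance

-- ===== CLAIM (what is proved, stated in full; the proofs are below) =====
def Claim_equal_unravel : Prop := ∀ (txt : String), Dom_unravel txt → Pre_unravel txt → Spec_unravel txt (unravel txt)


-- ===== LEMMAS AND PROOFS =====

-- proof-side names for the computations both ports perform on a string containing a '['
def pvIdxL (t : List Char) : Nat := (PySem.Chars.find t ['[']).toNat
def pvIdxR (t : List Char) : Nat := (PySem.Chars.find t [']']).toNat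
def pvSwitches (t : List Char) : List (List Char) :=
  PySem.Chars.splitOn (PySem.List.slice t (some ((pvIdxL t : Int)+1)) (some (pvIdxR t : Int))) ['|']
def pvChild (t sw : List Char) : List Char :=
  PySem.List.slice t none (some (pvIdxL t : Int)) ++ sw ++ PySem.List.slice t (some ((pvIdxR t : Int)+1)) none

-- the multiset of fully-expanded strings, with fuel
def pvLeaves : Nat → List Char → List (List Char)
  | 0, _ => []
  | fuel+1, t =>
    if PySem.Chars.isIn ['['] t = false then [t]
    else (pvSwitches t).flatMap (fun sw => pvLeaves fuel (pvChild t sw))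

def pvCnt (t : List Char) : Nat := t.count '['
def pvL (t : List Char) : List (List Char) := pvLeaves (pvCnt t + 1) t
def pvPre (t : List Char) : Prop := pvTermShape (pvCnt t + 1) (pvShape t) = true
def pvMsr (stack : List (List Char)) : Nat :=
  (stack.map (fun s => (s.length + 1) ^ (pvCnt s + 1))).sum

def pvQ : Char → Bool := fun c => c == '[' || c == ']' || c == '|'

-- a structural-recursion rendering of PySem.Chars.splitOn.go (the fuel there is always ample)
def pvMySplit : List Char → List Char → List (List Char) → List (List Char)
  | [], cur, acc => (cur.reverse :: acc).reverse
  | c :: r, cur, acc => if c = '|' then pvMySplit r [] (cur.reverse :: acc) else pvMySplit r (c :: cur) acc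

lemma pvMySplit_nil (cur : List Char) (acc : List (List Char)) :
    pvMySplit [] cur acc = (cur.reverse :: acc).reverse := rfl

lemma pvMySplit_bar (r cur : List Char) (acc : List (List Char)) :
    pvMySplit ('|' :: r) cur acc = pvMySplit r [] (cur.reverse :: acc) := by
  simp [pvMySplit]

lemma pvMySplit_cons (a : Char) (h : a ≠ '|') (r cur : List Char) (acc : List (List Char)) :
    pvMySplit (a :: r) cur acc = pvMySplit r (a :: cur) acc := by
  simp [pvMySplit, h]

lemma pvOfListInj : Function.Injective String.ofList := fun a b h => by
  simpa using congrArg String.toList h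

lemma pvIsIn_iff (c : Char) (t : List Char) :
    PySem.Chars.isIn [c] t = true ↔ c ∈ t := by
  rw [PySem.Chars.isIn_iff_infix]
  constructor
  · rintro ⟨l, r, h⟩; subst h; simp
  · intro h
    obtain ⟨l, r, h⟩ := List.append_of_mem h
    exact ⟨l, r, by simp [h]⟩

lemma pvSingleton_prefix_iff (c : Char) (l : List Char) :
    [c] <+: l ↔ ∃ r, l = c :: r := by
  cases l with
  | nil => simp
  | cons a t =>
    constructor
    · rintro ⟨r, h⟩; simp at h; exact ⟨t, by simp [h.1]⟩
    · rintro ⟨r, h⟩; simp at h; exact ⟨t, by simp [h.1]⟩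

lemma pvFindPos (p s : List Char) (c : Char) (hp : c ∉ p) :
    PySem.Chars.find (p ++ c :: s) [c] = (p.length : Int) := by
  have hinf : [c] <:+: (p ++ c :: s) := ⟨p, s, by simp⟩
  have h0 : 0 ≤ PySem.Chars.find (p ++ c :: s) [c] :=
    (PySem.Chars.find_nonneg_iff _ _).mpr hinf
  obtain ⟨hpre, hmin⟩ := PySem.Chars.find_spec h0
  set i := (PySem.Chars.find (p ++ c :: s) [c]).toNat with hi
  have hdropP : (p ++ c :: s).drop p.length = c :: s := by simp
  have hile : i ≤ p.length := by
    by_contra hgt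
    exact hmin p.length (by omega) (by rw [hdropP]; exact ⟨s, rfl⟩)
  have hige : ¬ i < p.length := by
    intro hlt
    obtain ⟨r, hr⟩ := (pvSingleton_prefix_iff c _).mp hpre
    have h1 : (p ++ c :: s)[i]? = some c := by
      have := congrArg List.head? hr
      simpa [List.head?_drop] using this
    have h2 : (p ++ c :: s)[i]? = p[i]? := List.getElem?_append_left hlt
    have h3 : p[i]? = some c := by rw [← h2, h1]
    obtain ⟨hlt2, he⟩ := List.getElem?_eq_some_iff.mp h3
    exact hp (he ▸ List.getElem_mem hlt2)
  have : i = p.length := by omega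
  omega

-- splitOn.go with ample fuel is pvMySplit
lemma pvSplitGoEq : ∀ (f : Nat) (l cur : List Char) (acc : List (List Char)), l.length < f →
    PySem.Chars.splitOn.go ['|'] f l cur acc = pvMySplit l cur acc := by
  intro f
  induction f with
  | zero => intro l cur acc h; exact absurd h (Nat.not_lt_zero _)
  | succ g ih =>
    intro l cur acc h
    cases l with
    | nil => simp [PySem.Chars.splitOn.go, pvMySplit]
    | cons a r =>
      by_cases hA : a = '|'
      · subst hA
        rw [show PySem.Chars.splitOn.go ['|'] (g+1) ('|' :: r) cur acc =
            PySem.Chars.splitOn.go ['|'] g r [] (cur.reverse :: acc) by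
          simp [PySem.Chars.splitOn.go, List.isPrefixOf]]
        rw [ih r [] _ (by simpa using h), pvMySplit_bar]
      · rw [show PySem.Chars.splitOn.go ['|'] (g+1) (a :: r) cur acc =
            PySem.Chars.splitOn.go ['|'] g r (a :: cur) acc by
          simp [PySem.Chars.splitOn.go, List.isPrefixOf, Ne.symm hA]]
        rw [ih r _ _ (by simpa using h), pvMySplit_cons a hA]

lemma pvSplitOnEq (m : List Char) : PySem.Chars.splitOn m ['|'] = pvMySplit m [] [] :=
  pvSplitGoEq (m.length + 1) m [] [] (by omega)

lemma pvMySplit_mem : ∀ (l cur : List Char) (acc : List (List Char)) (p : List Char),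
    p ∈ pvMySplit l cur acc → p ∈ acc ∨
      (∀ c : Char, p.count c ≤ cur.count c + l.count c) ∧ p.length ≤ cur.length + l.length := by
  intro l
  induction l with
  | nil =>
    intro cur acc p hp
    rw [pvMySplit_nil] at hp
    simp only [List.mem_reverse, List.mem_cons] at hp
    rcases hp with rfl | hp
    · exact Or.inr ⟨fun c => by simp, by simp⟩
    · exact Or.inl hp
  | cons a r ih =>
    intro cur acc p hp
    by_cases hA : a = '|'
    · subst hA
      rw [pvMySplit_bar] at hp
      rcases ih [] _ p hp with hin | ⟨hc, hl⟩
      · rcases List.mem_cons.mp hin with rfl | hin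
        · exact Or.inr ⟨fun c => by simp only [List.count_reverse, List.count_cons]; omega,
            by simp only [List.length_reverse, List.length_cons]; omega⟩
        · exact Or.inl hin
      · exact Or.inr ⟨fun c => by have := hc c; simp [List.count_cons] at this ⊢; omega,
          by simp at hl ⊢; omega⟩
    · rw [pvMySplit_cons a hA] at hp
      rcases ih (a :: cur) _ p hp with hin | ⟨hc, hl⟩
      · exact Or.inl hin
      · exact Or.inr ⟨fun c => by have := hc c; simp [List.count_cons] at this ⊢; omega,
          by simp at hl ⊢; omega⟩

lemma pvSplitOn_mem (m p : List Char) (hp : p ∈ PySem.Chars.splitOn m ['|']) :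
    (∀ c : Char, p.count c ≤ m.count c) ∧ p.length ≤ m.length := by
  rw [pvSplitOnEq] at hp
  rcases pvMySplit_mem m [] [] p hp with hin | ⟨hc, hl⟩
  · simp at hin
  · exact ⟨fun c => by simpa using hc c, by simpa using hl⟩

lemma pvMySplit_len : ∀ (l cur : List Char) (acc : List (List Char)),
    (pvMySplit l cur acc).length = acc.length + 1 + l.count '|' := by
  intro l
  induction l with
  | nil => intro cur acc; rw [pvMySplit_nil]; simp
  | cons a r ih =>
    intro cur acc
    by_cases hA : a = '|'
    · subst hA; rw [pvMySplit_bar, ih]; simp [List.count_cons]; omega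
    · rw [pvMySplit_cons a hA, ih]; simp [List.count_cons, hA]

lemma pvSplitOn_len (m : List Char) :
    (PySem.Chars.splitOn m ['|']).length = 1 + m.count '|' := by
  rw [pvSplitOnEq, pvMySplit_len]; simp

-- filtering to the '[',']','|'-shape commutes with splitting on '|'
lemma pvMySplit_filter : ∀ (l cur : List Char) (acc : List (List Char)),
    pvMySplit (l.filter pvQ) (cur.filter pvQ) (acc.map (fun x => x.filter pvQ)) =
      (pvMySplit l cur acc).map (fun x => x.filter pvQ) := by
  intro l
  induction l with
  | nil =>
    intro cur acc
    rw [List.filter_nil, pvMySplit_nil, pvMySplit_nil]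
    simp [List.filter_reverse]
  | cons a r ih =>
    intro cur acc
    by_cases hA : a = '|'
    · subst hA
      have hq : pvQ '|' = true := by decide
      rw [List.filter_cons_of_pos hq, pvMySplit_bar, pvMySplit_bar]
      rw [show (cur.filter pvQ).reverse :: acc.map (fun x => x.filter pvQ) =
          ((cur.reverse :: acc).map (fun x => x.filter pvQ)) by simp [List.filter_reverse]]
      exact ih [] (cur.reverse :: acc)
    · by_cases hq : pvQ a = true
      · rw [List.filter_cons_of_pos hq, pvMySplit_cons a hA, pvMySplit_cons a hA]
        rw [show a :: cur.filter pvQ = (a :: cur).filter pvQ by rw [List.filter_cons_of_pos hq]]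
        exact ih (a :: cur) acc
      · rw [List.filter_cons_of_neg (by simpa using hq), pvMySplit_cons a hA]
        rw [show cur.filter pvQ = (a :: cur).filter pvQ by
          rw [List.filter_cons_of_neg (by simpa using hq)]]
        exact ih (a :: cur) acc

lemma pvSplitOn_filter (m : List Char) :
    PySem.Chars.splitOn (m.filter pvQ) ['|'] =
      (PySem.Chars.splitOn m ['|']).map (fun x => x.filter pvQ) := by
  rw [pvSplitOnEq, pvSplitOnEq m]
  simpa using pvMySplit_filter m [] []

-- splitting a list at the first occurrence of c
lemma pvTakeDropAt (c : Char) (u v : List Char) (hu : c ∉ u) :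
    (u ++ c :: v).takeWhile (fun x => !decide (x = c)) = u ∧
      (u ++ c :: v).dropWhile (fun x => !decide (x = c)) = c :: v := by
  induction u with
  | nil => constructor <;> simp
  | cons a r ih =>
    have ha : a ≠ c := fun h => hu (h ▸ List.mem_cons_self)
    have h2 := ih (fun h => hu (List.mem_cons_of_mem _ h))
    constructor
    · rw [List.cons_append, List.takeWhile_cons]
      simp [ha, h2.1]
    · rw [List.cons_append, List.dropWhile_cons]
      simp [ha, h2.2]

lemma pvSplitFirst (c : Char) (l : List Char) (h : c ∈ l) :
    ∃ u v, l = u ++ c :: v ∧ c ∉ u ∧ l.takeWhile (fun x => !decide (x = c)) = u ∧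
      (l.dropWhile (fun x => !decide (x = c))).tail = v := by
  induction l with
  | nil => simp at h
  | cons a r ih =>
    by_cases hac : a = c
    · subst hac
      exact ⟨[], r, rfl, by simp, by rw [List.takeWhile_cons]; simp,
        by rw [List.dropWhile_cons]; simp⟩
    · have hne : a ≠ c := hac
      have hcr : c ∈ r := by
        rcases List.mem_cons.mp h with h1 | h1
        · exact absurd h1.symm hac
        · exact h1
      obtain ⟨u, v, he, hnu, htw, hdw⟩ := ih hcr
      refine ⟨a :: u, v, by rw [List.cons_append, he], ?_, ?_, ?_⟩
      · intro hc
        rcases List.mem_cons.mp hc with h1 | h1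
        · exact hac h1.symm
        · exact hnu h1
      · rw [List.takeWhile_cons]
        simp [hne, htw]
      · rw [List.dropWhile_cons]
        simp [hne, hdw]

-- pvTermShape evaluated on a decomposed shape
lemma pvTermShape_decomp (d : Nat) (P M post : List Char)
    (hP1 : '[' ∉ P) (hP2 : ']' ∉ P) (hM : ']' ∉ M) :
    pvTermShape (d+1) (P ++ '[' :: M ++ ']' :: post) =
      (PySem.Chars.splitOn M ['|']).all (fun piece => pvTermShape d (P ++ piece ++ post)) := by
  have hmem : '[' ∈ P ++ '[' :: M ++ ']' :: post := by simp
  have hmem2 : ']' ∈ P ++ '[' :: M ++ ']' :: post := by simp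
  have hnoR : ']' ∉ P ++ '[' :: M := by
    intro h
    rcases List.mem_append.mp h with h | h
    · exact hP2 h
    · rcases List.mem_cons.mp h with h | h
      · simp at h
      · exact hM h
  have htd := pvTakeDropAt ']' (P ++ '[' :: M) post hnoR
  have hpre : (P ++ '[' :: M ++ ']' :: post).takeWhile (fun x => !decide (x = ']')) =
      P ++ '[' :: M := by
    have := htd.1; rwa [List.append_assoc] at this ⊢
  have hpost : ((P ++ '[' :: M ++ ']' :: post).dropWhile (fun x => !decide (x = ']'))).tail =
      post := by
    have := htd.2
    rw [List.append_assoc] at this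
    rw [List.append_assoc, this]
    rfl
  have htd2 := pvTakeDropAt '[' P M hP1
  simp only [pvTermShape]
  rw [hpre, hpost, htd2.1, htd2.2]
  rw [if_neg (not_not_intro hmem), if_neg (not_not_intro hmem2),
    if_neg (not_not_intro (by simp : '[' ∈ P ++ '[' :: M))]
  simp

-- the depth parameter is irrelevant above the '['-count
lemma pvTermShape_true_iff : ∀ (d1 d2 : Nat) (w : List Char), w.count '[' < d1 → w.count '[' < d2 →
    (pvTermShape d1 w = true ↔ pvTermShape d2 w = true) := by
  intro d1
  induction d1 with
  | zero => intro d2 w h; exact absurd h (Nat.not_lt_zero _)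
  | succ d ih =>
    intro d2 w h1 h2
    obtain ⟨e, rfl⟩ : ∃ e, d2 = e + 1 := ⟨d2 - 1, by omega⟩
    by_cases hin : '[' ∈ w
    · by_cases hr : ']' ∈ w
      · by_cases hpr : '[' ∈ w.takeWhile (fun x => !decide (x = ']'))
        · -- decompose w
          obtain ⟨pre, post, hw1, hnoR, htw, hdw⟩ := pvSplitFirst ']' w hr
          rw [htw] at hpr
          obtain ⟨P, M, hw2, hnoL, htw2, hdw2⟩ := pvSplitFirst '[' pre hpr
          have hPr : ']' ∉ P := fun hc => hnoR (hw2 ▸ List.mem_append_left _ hc)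
          have hMr : ']' ∉ M := fun hc => hnoR (hw2 ▸ (by simp [hc] : ']' ∈ P ++ '[' :: M))
          have hw : w = P ++ '[' :: M ++ ']' :: post := by
            first
            | (rw [hw1, hw2]; simp)
            | rw [hw1, hw2]
          have hcnt : w.count '[' = M.count '[' + post.count '[' + 1 := by
            rw [hw]
            first
            | (simp only [List.count_append, List.count_cons, List.count_eq_zero.mpr hnoL]; omega)
            | (simp [List.count_append, List.count_cons, List.count_eq_zero.mpr hnoL]; omega)
            | simp [List.count_append, List.count_cons, List.count_eq_zero.mpr hnoL]
          rw [hw, pvTermShape_decomp d P M post hnoL hPr hMr,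
            pvTermShape_decomp e P M post hnoL hPr hMr]
          simp only [List.all_eq_true]
          constructor <;> intro hall piece hp
          · have hpc := (pvSplitOn_mem M piece hp).1 '['
            have : (P ++ piece ++ post).count '[' < d ∧ (P ++ piece ++ post).count '[' < e := by
              simp only [List.count_append, List.count_eq_zero.mpr hnoL]
              omega
            exact (ih e _ this.1 this.2).mp (hall piece hp)
          · have hpc := (pvSplitOn_mem M piece hp).1 '['
            have : (P ++ piece ++ post).count '[' < d ∧ (P ++ piece ++ post).count '[' < e := by
              simp only [List.count_append, List.count_eq_zero.mpr hnoL]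
              omega
            exact (ih e _ this.1 this.2).mpr (hall piece hp)
        · simp only [pvTermShape]
          rw [if_neg (not_not_intro hin), if_neg (not_not_intro hr),
            if_pos hpr, if_neg (not_not_intro hin), if_neg (not_not_intro hr), if_pos hpr]
      · simp only [pvTermShape]
        rw [if_neg (not_not_intro hin), if_pos hr, if_neg (not_not_intro hin), if_pos hr]
    · simp only [pvTermShape]
      rw [if_pos hin, if_pos hin]

lemma pvShape_eq (t : List Char) : pvShape t = t.filter pvQ := rfl

lemma pvShape_append (u v : List Char) : pvShape (u ++ v) = pvShape u ++ pvShape v := by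
  simp [pvShape_eq]

lemma pvShape_count (t : List Char) (c : Char) (hc : pvQ c = true) :
    (pvShape t).count c = t.count c := by
  rw [pvShape_eq]
  induction t with
  | nil => simp
  | cons a r ih =>
    by_cases hq : pvQ a = true
    · rw [List.filter_cons_of_pos hq]
      simp [List.count_cons, ih]
    · rw [List.filter_cons_of_neg (by simpa using hq)]
      rw [ih, List.count_cons]
      have : ¬ a = c := fun h => by rw [h] at hq; exact hq hc
      simp [this]

lemma pvShape_mem (t : List Char) (c : Char) (hc : pvQ c = true) : c ∈ pvShape t ↔ c ∈ t := by
  rw [pvShape_eq]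
  constructor
  · intro h; exact (List.mem_filter.mp h).1
  · intro h; exact List.mem_filter.mpr ⟨h, hc⟩

lemma pvShape_nomem (u : List Char) (c : Char) (hc : pvQ c = true) (h : c ∉ u) :
    c ∉ pvShape u := fun hx => h ((pvShape_mem u c hc).mp hx)

-- the central expansion lemma: on a Pre_ string containing '[', both ports find the same
-- decomposition, every child is again a Pre_ string, and the sizes shrink
lemma pvExpandFacts (t : List Char) (hg : pvPre t) (hm : '[' ∈ t) :
    (∀ sw ∈ pvSwitches t, pvPre (pvChild t sw) ∧ pvCnt (pvChild t sw) + 1 ≤ pvCnt t ∧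
        (pvChild t sw).length + 2 ≤ t.length) ∧
      (pvSwitches t).length + 1 ≤ t.length ∧ 2 ≤ t.length := by
  -- unfold pvPre via the shape decomposition
  have hms : '[' ∈ pvShape t := (pvShape_mem t '[' (by decide)).mpr hm
  have hr : ']' ∈ t := by
    by_contra habs
    have hg' := hg
    unfold pvPre at hg'
    simp only [pvTermShape] at hg'
    rw [if_neg (not_not_intro hms), if_pos (pvShape_nomem t ']' (by decide) habs)] at hg'
    exact absurd hg' (by simp)
  obtain ⟨pre, post, hw1, hnoR, htw, hdw⟩ := pvSplitFirst ']' t hr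
  have hpr : '[' ∈ pre := by
    by_contra habs
    have hg' := hg
    unfold pvPre at hg'
    simp only [pvTermShape] at hg'
    have hshape : (pvShape t).takeWhile (fun x => !decide (x = ']')) = pvShape pre := by
      have hcons : pvShape (']' :: post) = ']' :: pvShape post := by
        rw [pvShape_eq, pvShape_eq, List.filter_cons_of_pos (by decide)]
      have hdec : pvShape t = pvShape pre ++ ']' :: pvShape post := by
        rw [hw1, pvShape_append, hcons]
      rw [hdec]
      exact (pvTakeDropAt ']' (pvShape pre) (pvShape post)
        (pvShape_nomem pre ']' (by decide) hnoR)).1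
    rw [if_neg (not_not_intro hms),
      if_neg (not_not_intro ((pvShape_mem t ']' (by decide)).mpr hr)), hshape,
      if_pos (pvShape_nomem pre '[' (by decide) habs)] at hg'
    exact absurd hg' (by simp)
  obtain ⟨p, m, hw2, hnoL, htw2, hdw2⟩ := pvSplitFirst '[' pre hpr
  have hPr : ']' ∉ p := fun hc => hnoR (hw2 ▸ List.mem_append_left _ hc)
  have hMr : ']' ∉ m := fun hc => hnoR (hw2 ▸ (by simp [hc] : ']' ∈ p ++ '[' :: m))
  have ht : t = p ++ ('[' :: (m ++ ']' :: post)) := by rw [hw1, hw2]; simp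
  clear hw1 hw2 htw hdw htw2 hdw2
  -- rename for readability
  set s := post with hs
  have htlen : t.length = p.length + m.length + s.length + 2 := by
    rw [ht]; simp only [List.length_append, List.length_cons]; omega
  -- the indices both ports compute
  have hfL : PySem.Chars.find t ['['] = (p.length : Int) := by
    rw [ht]; exact pvFindPos p _ '[' hnoL
  have hL : pvIdxL t = p.length := by rw [pvIdxL, hfL]; simp
  have hassoc : t = (p ++ '[' :: m) ++ ']' :: s := by rw [ht]; simp
  have hfR : PySem.Chars.find t [']'] = ((p ++ '[' :: m).length : Int) := by
    rw [hassoc]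
    apply pvFindPos
    intro hc
    rcases List.mem_append.mp hc with hc | hc
    · exact hPr hc
    · rcases List.mem_cons.mp hc with hc | hc
      · simp at hc
      · exact hMr hc
  have hR : pvIdxR t = p.length + 1 + m.length := by
    rw [pvIdxR, hfR]; simp only [List.length_append, List.length_cons, Int.toNat_natCast]; omega
  have hsl : PySem.List.slice t none (some (pvIdxL t : Int)) = p := by
    rw [hL, PySem.List.slice_to_natCast, ht, List.take_left]
  have hsm : PySem.List.slice t (some ((pvIdxL t : Int)+1)) (some (pvIdxR t : Int)) = m := by
    rw [hL, hR]
    have h1 : ((p.length : Nat) : Int) + 1 = ((p.length + 1 : Nat) : Int) := by push_cast; ring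
    rw [h1, PySem.List.slice_natCast]
    have h2 : t.drop (p.length + 1) = m ++ ']' :: s := by
      have h3 : t = (p ++ ['[']) ++ (m ++ ']' :: s) := by rw [ht]; simp
      have h4 : p.length + 1 = (p ++ ['[']).length := by simp
      rw [h3, h4, List.drop_left]
    rw [h2]
    have h5 : p.length + 1 + m.length - (p.length + 1) = m.length := by omega
    rw [h5, List.take_left]
  have hss : PySem.List.slice t (some ((pvIdxR t : Int)+1)) none = s := by
    rw [hR]
    have h1 : ((p.length + 1 + m.length : Nat) : Int) + 1 =
        ((p.length + 1 + m.length + 1 : Nat) : Int) := by push_cast; ring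
    rw [h1, PySem.List.slice_from_natCast]
    have h3 : t = ((p ++ '[' :: m) ++ [']']) ++ s := by rw [ht]; simp
    have h4 : p.length + 1 + m.length + 1 = ((p ++ '[' :: m) ++ [']']).length := by
      simp; omega
    rw [h3, h4, List.drop_left]
  have hsw : pvSwitches t = PySem.Chars.splitOn m ['|'] := by rw [pvSwitches, hsm]
  have hch : ∀ sw, pvChild t sw = p ++ sw ++ s := fun sw => by rw [pvChild, hsl, hss]
  have hzp : p.count '[' = 0 := List.count_eq_zero.mpr hnoL
  have hcnt : pvCnt t = m.count '[' + s.count '[' + 1 := by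
    rw [pvCnt, ht]
    first
    | (simp only [List.count_append, List.count_cons, hzp]; omega)
    | (simp [List.count_append, List.count_cons, hzp]; omega)
    | simp [List.count_append, List.count_cons, hzp]
  -- pvPre t, unfolded through the shape decomposition
  have hshape : pvShape t = pvShape p ++ ('[' :: (pvShape m ++ ']' :: pvShape s)) := by
    rw [ht, pvShape_append]
    rw [show pvShape ('[' :: (m ++ ']' :: post)) = '[' :: (pvShape m ++ ']' :: pvShape s) from by
      rw [pvShape_eq, List.filter_cons_of_pos (by decide), List.filter_append,
        List.filter_cons_of_pos (by decide)]
      rfl]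
  have hgall : ∀ piece ∈ PySem.Chars.splitOn (pvShape m) ['|'],
      pvTermShape (pvCnt t) (pvShape p ++ piece ++ pvShape s) = true := by
    have hg' := hg
    unfold pvPre at hg'
    rw [hshape] at hg'
    rw [show (pvShape p ++ ('[' :: (pvShape m ++ ']' :: pvShape s)) : List Char) =
        pvShape p ++ '[' :: pvShape m ++ ']' :: pvShape s from by simp] at hg'
    rw [pvTermShape_decomp (pvCnt t) _ _ _ (pvShape_nomem p '[' (by decide) hnoL)
      (pvShape_nomem p ']' (by decide) hPr) (pvShape_nomem m ']' (by decide) hMr)] at hg'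
    intro piece hp
    have := List.all_eq_true.mp hg' piece hp
    simpa using this
  refine ⟨?_, ?_, by omega⟩
  · intro sw hswm
    rw [hsw] at hswm
    obtain ⟨hswc, hswl⟩ := pvSplitOn_mem m sw hswm
    have hswcnt : sw.count '[' ≤ m.count '[' := hswc '['
    have hchcnt : pvCnt (pvChild t sw) = sw.count '[' + s.count '[' := by
      rw [hch sw, pvCnt]
      simp [List.count_append, hzp]
    refine ⟨?_, by omega, ?_⟩
    · -- child is again Pre_
      have hpfilter : pvShape sw ∈ PySem.Chars.splitOn (pvShape m) ['|'] := by
        rw [pvShape_eq, pvShape_eq, pvSplitOn_filter]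
        exact List.mem_map.mpr ⟨sw, hswm, rfl⟩
      have hchs : pvShape (pvChild t sw) = pvShape p ++ pvShape sw ++ pvShape s := by
        rw [hch sw, pvShape_append, pvShape_append]
      have h1 := hgall (pvShape sw) hpfilter
      unfold pvPre
      rw [hchs]
      have hc1 : (pvShape p ++ pvShape sw ++ pvShape s).count '[' = pvCnt (pvChild t sw) := by
        rw [← pvShape_append, ← pvShape_append, ← hch sw, pvShape_count _ _ (by decide)]
        rfl
      refine (pvTermShape_true_iff (pvCnt t) (pvCnt (pvChild t sw) + 1) _ ?_ ?_).mp h1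
      · rw [hc1]; omega
      · rw [hc1]; omega
    · have : (pvChild t sw).length = p.length + sw.length + s.length := by
        rw [hch sw]; simp; omega
      omega
  · rw [hsw, pvSplitOn_len]
    have := List.count_le_length (l := m) (a := '|')
    omega

lemma pvGoA_not (fuel : Nat) (t : List Char) (h : PySem.Chars.isIn ['['] t = false) :
    unravelGoA (fuel+1) t = [t] := by
  simp [unravelGoA, h]

lemma pvGoA_mem (fuel : Nat) (t : List Char) (h : PySem.Chars.isIn ['['] t = true) :
    unravelGoA (fuel+1) t =
      PySem.List.sorted ((pvSwitches t).foldl (fun ret sw =>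
        if PySem.Chars.isIn ['['] (pvChild t sw) then ret ++ unravelGoA fuel (pvChild t sw)
        else ret ++ [pvChild t sw]) []) (fun cs => String.ofList cs) false := by
  simp [unravelGoA, h, pvSwitches, pvChild, pvIdxL, pvIdxR]

lemma pvGoB_nil (fuel : Nat) (results : List (List Char)) :
    unravelGoB fuel [] results = PySem.List.sorted results (fun cs => String.ofList cs) false := by
  cases fuel <;> simp [unravelGoB]

lemma pvGoB_not (fuel : Nat) (st : List Char) (stk results : List (List Char))
    (h : PySem.Chars.isIn ['['] ((st :: stk).getLast (by simp)) = false) :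
    unravelGoB (fuel+1) (st :: stk) results =
      unravelGoB fuel ((st :: stk).dropLast) (results ++ [(st :: stk).getLast (by simp)]) := by
  simp [unravelGoB, h]

lemma pvGoB_mem (fuel : Nat) (st : List Char) (stk results : List (List Char))
    (h : PySem.Chars.isIn ['['] ((st :: stk).getLast (by simp)) = true) :
    unravelGoB (fuel+1) (st :: stk) results =
      unravelGoB fuel ((st :: stk).dropLast ++
        (pvSwitches ((st :: stk).getLast (by simp))).map
          (fun sw => pvChild ((st :: stk).getLast (by simp)) sw)) results := by
  simp [unravelGoB, h, pvSwitches, pvChild, pvIdxL, pvIdxR]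

lemma pvLeavesMono : ∀ (f1 f2 : Nat) (t : List Char), pvPre t → pvCnt t < f1 → pvCnt t < f2 →
    pvLeaves f1 t = pvLeaves f2 t := by
  intro f1
  induction f1 with
  | zero => intro f2 t _ h1 _; exact absurd h1 (Nat.not_lt_zero _)
  | succ f ih =>
    intro f2 t hg h1 h2
    cases f2 with
    | zero => exact absurd h2 (Nat.not_lt_zero _)
    | succ f2' =>
      by_cases hIn : PySem.Chars.isIn ['['] t = false
      · simp [pvLeaves, hIn]
      · have hIn' : PySem.Chars.isIn ['['] t = true := by simpa using hIn
        have hmem : '[' ∈ t := (pvIsIn_iff _ _).mp hIn'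
        simp only [pvLeaves, hIn']
        norm_num
        refine List.flatMap_congr ?_
        intro sw hsw
        obtain ⟨hgc, hcnt, _⟩ := (pvExpandFacts t hg hmem).1 sw hsw
        exact ih f2' (pvChild t sw) hgc (by omega) (by omega)

lemma pvLA : ∀ (fuel : Nat) (t : List Char), pvPre t → pvCnt t < fuel →
    unravelGoA fuel t = PySem.List.sorted (pvLeaves fuel t) (fun cs => String.ofList cs) false := by
  intro fuel
  induction fuel with
  | zero => intro t _ h; exact absurd h (Nat.not_lt_zero _)
  | succ f ih =>
    intro t hg hf
    by_cases hIn : PySem.Chars.isIn ['['] t = false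
    · rw [pvGoA_not f t hIn]
      rw [show pvLeaves (f+1) t = [t] by simp [pvLeaves, hIn]]
      exact (PySem.List.sorted_eq_self_of_pairwise _ _ (by simp)).symm
    · have hIn' : PySem.Chars.isIn ['['] t = true := by simpa using hIn
      have hmem : '[' ∈ t := (pvIsIn_iff _ _).mp hIn'
      have hfacts := (pvExpandFacts t hg hmem).1
      rw [pvGoA_mem f t hIn']
      have hfold : (pvSwitches t).foldl (fun ret sw =>
            if PySem.Chars.isIn ['['] (pvChild t sw) then ret ++ unravelGoA f (pvChild t sw)
            else ret ++ [pvChild t sw]) [] =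
          (pvSwitches t).flatMap (fun sw =>
            if PySem.Chars.isIn ['['] (pvChild t sw) then unravelGoA f (pvChild t sw)
            else [pvChild t sw]) := by
        calc (pvSwitches t).foldl (fun ret sw =>
              if PySem.Chars.isIn ['['] (pvChild t sw) then ret ++ unravelGoA f (pvChild t sw)
              else ret ++ [pvChild t sw]) []
            = (pvSwitches t).foldl (fun ret sw => ret ++
                (if PySem.Chars.isIn ['['] (pvChild t sw) then unravelGoA f (pvChild t sw)
                 else [pvChild t sw])) [] := by
              apply PySem.List.foldl_congr_mem
              intro acc sw _
              by_cases hc : PySem.Chars.isIn ['['] (pvChild t sw) = true <;> simp [hc]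
          _ = [] ++ (pvSwitches t).flatMap (fun sw =>
                if PySem.Chars.isIn ['['] (pvChild t sw) then unravelGoA f (pvChild t sw)
                else [pvChild t sw]) := PySem.List.foldl_append_eq_flatMap _ _ _
          _ = _ := List.nil_append _
      rw [hfold]
      rw [show pvLeaves (f+1) t =
        (pvSwitches t).flatMap (fun sw => pvLeaves f (pvChild t sw)) by simp [pvLeaves, hIn']]
      apply PySem.List.sorted_eq_sorted_of_perm _ _ _ pvOfListInj
      apply List.Perm.flatMap_left
      intro sw hsw
      obtain ⟨hgc, hcnt, _⟩ := hfacts sw hsw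
      have hcnt' : pvCnt (pvChild t sw) < f := by omega
      by_cases hc : PySem.Chars.isIn ['['] (pvChild t sw) = true
      · rw [if_pos hc, ih (pvChild t sw) hgc hcnt']
        exact PySem.List.sorted_perm _ _ _
      · have hc' : PySem.Chars.isIn ['['] (pvChild t sw) = false := by simpa using hc
        rw [if_neg hc]
        obtain ⟨f', rfl⟩ : ∃ f', f = f' + 1 := ⟨f - 1, by omega⟩
        rw [show pvLeaves (f'+1) (pvChild t sw) = [pvChild t sw] by simp [pvLeaves, hc']]

lemma pvMsr_append (l1 l2 : List (List Char)) : pvMsr (l1 ++ l2) = pvMsr l1 + pvMsr l2 := by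
  simp [pvMsr]

lemma pvLB : ∀ (fuel : Nat) (stack results : List (List Char)),
    (∀ s ∈ stack, pvPre s) → pvMsr stack < fuel →
    unravelGoB fuel stack results =
      PySem.List.sorted (results ++ stack.reverse.flatMap pvL) (fun cs => String.ofList cs) false := by
  intro fuel
  induction fuel with
  | zero => intro stack results _ hf; exact absurd hf (Nat.not_lt_zero _)
  | succ f ih =>
    intro stack results hg hf
    cases stack with
    | nil => rw [pvGoB_nil]; simp
    | cons st stk =>
      have hne : (st :: stk) ≠ [] := by simp
      have hsplit : (st :: stk).dropLast ++ [(st :: stk).getLast (by simp)] = st :: stk :=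
        List.dropLast_append_getLast hne
      set s := (st :: stk).getLast (by simp) with hs
      set rest := (st :: stk).dropLast with hrest
      have hsmem : s ∈ st :: stk := List.getLast_mem hne
      have hgs : pvPre s := hg s hsmem
      have hgrest : ∀ x ∈ rest, pvPre x := fun x hx =>
        hg x (by rw [← hsplit]; exact List.mem_append_left _ hx)
      have hmsr : pvMsr rest + (s.length + 1) ^ (pvCnt s + 1) = pvMsr (st :: stk) := by
        rw [← hsplit, pvMsr_append]; simp [pvMsr]
      have hrev : (st :: stk).reverse = s :: rest.reverse := by rw [← hsplit]; simp
      have hTpos : 0 < (s.length + 1) ^ (pvCnt s + 1) := pow_pos (by omega) _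
      by_cases hIn : PySem.Chars.isIn ['['] s = false
      · rw [pvGoB_not f st stk results hIn]
        rw [ih rest (results ++ [s]) hgrest (by omega)]
        rw [hrev]
        have hnm : '[' ∉ s := fun h => by simp [(pvIsIn_iff '[' s).mpr h] at hIn
        have hcnt0 : pvCnt s = 0 := by
          rw [pvCnt]; exact List.count_eq_zero.mpr hnm
        have hLs : pvL s = [s] := by rw [pvL, hcnt0]; simp [pvLeaves, hIn]
        rw [List.flatMap_cons, hLs]
        simp
      · have hIn' : PySem.Chars.isIn ['['] s = true := by simpa using hIn
        have hmem : '[' ∈ s := (pvIsIn_iff _ _).mp hIn'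
        obtain ⟨hfacts, hswlen, hlen2⟩ := pvExpandFacts s hgs hmem
        have hcntpos : 0 < pvCnt s := by
          rw [pvCnt]; exact List.count_pos_iff.mpr hmem
        rw [pvGoB_mem f st stk results hIn']
        set children := (pvSwitches s).map (fun sw => pvChild s sw) with hch
        have hgall : ∀ x ∈ rest ++ children, pvPre x := by
          intro x hx
          rcases List.mem_append.mp hx with hx | hx
          · exact hgrest x hx
          · obtain ⟨sw, hsw, rfl⟩ := List.mem_map.mp hx
            exact (hfacts sw hsw).1
        have hmch : pvMsr children < (s.length + 1) ^ (pvCnt s + 1) := by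
          have hbase : 1 ≤ s.length - 1 := by omega
          have hterm : ∀ x ∈ children.map (fun c => (c.length + 1) ^ (pvCnt c + 1)),
              x ≤ (s.length - 1) ^ pvCnt s := by
            intro x hx
            obtain ⟨c, hc, rfl⟩ := List.mem_map.mp hx
            obtain ⟨sw, hsw, rfl⟩ := List.mem_map.mp hc
            obtain ⟨_, hcnt, hlen⟩ := hfacts sw hsw
            calc ((pvChild s sw).length + 1) ^ (pvCnt (pvChild s sw) + 1)
                ≤ (s.length - 1) ^ (pvCnt (pvChild s sw) + 1) :=
                  Nat.pow_le_pow_left (by omega) _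
              _ ≤ (s.length - 1) ^ pvCnt s :=
                  Nat.pow_le_pow_right hbase (by omega)
          have hclen : children.length ≤ s.length - 1 := by
            rw [hch, List.length_map]; omega
          calc pvMsr children
              ≤ (children.map (fun c => (c.length + 1) ^ (pvCnt c + 1))).length •
                  ((s.length - 1) ^ pvCnt s) := List.sum_le_card_nsmul _ _ hterm
            _ = children.length * ((s.length - 1) ^ pvCnt s) := by simp [smul_eq_mul]
            _ ≤ (s.length - 1) * ((s.length - 1) ^ pvCnt s) :=
                Nat.mul_le_mul_right _ hclen
            _ = (s.length - 1) ^ (pvCnt s + 1) := by rw [pow_succ, Nat.mul_comm]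
            _ < (s.length + 1) ^ (pvCnt s + 1) := Nat.pow_lt_pow_left (by omega) (by omega)
        have hmapp : pvMsr (rest ++ children) = pvMsr rest + pvMsr children :=
          pvMsr_append _ _
        rw [ih (rest ++ children) results hgall (by omega)]
        apply PySem.List.sorted_eq_sorted_of_perm _ _ _ pvOfListInj
        apply List.Perm.append_left
        rw [hrev, List.reverse_append, List.flatMap_append, List.flatMap_cons]
        apply List.Perm.append_right
        have h1 : pvL s = children.flatMap pvL := by
          rw [pvL]
          rw [show pvLeaves (pvCnt s + 1) s =
            (pvSwitches s).flatMap (fun sw => pvLeaves (pvCnt s) (pvChild s sw)) by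
              simp [pvLeaves, hIn']]
          rw [hch, List.flatMap_map]
          apply List.flatMap_congr
          intro sw hsw
          obtain ⟨hgc, hcnt, _⟩ := hfacts sw hsw
          exact pvLeavesMono (pvCnt s) (pvCnt (pvChild s sw) + 1) _ hgc (by omega) (by omega)
        rw [h1]
        exact (List.reverse_perm children).flatMap_right pvL

-- ===== VERDICT (by name: the statement is the Claim_ definition above) =====
theorem unravel_spec : Claim_equal_unravel := by
  intro txt _hdom hpre
  unfold Spec_unravel unravel unravel_alt
  refine congrArg _ ?_
  have hg : pvPre txt.toList := hpre
  rw [pvLA (txt.toList.count '[' + 1) txt.toList hg (Nat.lt_succ_self _)]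
  rw [pvLB ((txt.toList.length + 1) ^ (txt.toList.length + 1) + 1) [txt.toList] []
    (by intro x hx; rw [List.mem_singleton] at hx; subst hx; exact hg) ?_]
  · simp [pvL, pvCnt]
  · have h1 : pvCnt txt.toList ≤ txt.toList.length := List.count_le_length
    have h2 : (txt.toList.length + 1) ^ (pvCnt txt.toList + 1) ≤
        (txt.toList.length + 1) ^ (txt.toList.length + 1) :=
      Nat.pow_le_pow_right (by omega) (by omega)
    have h3 : pvMsr [txt.toList] = (txt.toList.length + 1) ^ (pvCnt txt.toList + 1) := by
      simp [pvMsr]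
    omega
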